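-- pv_equiv track=rewrite | github.com/msaedi/instructly | backend/app/services/search/nl_pipeline/hydration_helpers.py | derive_service_offers
-- ===== SOURCE A (Python) =====
-- from typing import TYPE_CHECKING, Dict, List, Optional, Sequence, TypedDict, cast
--
-- class SerializedFormatPrice(TypedDict):
--     format: str
--     hourly_rate: float
--
-- def derive_service_offers(format_prices: List[SerializedFormatPrice]) -> Dict[str, bool]:
--     """Derive lesson-format booleans from serialized format prices."""
--     enabled_formats = {
--         str(price_row.get("format"))
--         for price_row in format_prices
--         if isinstance(price_row, dict) and price_row.get("format")
--     }
--     return {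
--         "offers_travel": "student_location" in enabled_formats,
--         "offers_at_location": "instructor_location" in enabled_formats,
--         "offers_online": "online" in enabled_formats,
--     }
-- ===== SOURCE B (Python) =====
-- _OFFER_TABLE = (
--     ("offers_travel", "student_location"),
--     ("offers_at_location", "instructor_location"),
--     ("offers_online", "online"),
-- )
--
-- def derive_service_offers(format_prices):
--     """Derive lesson-format booleans from serialized format prices.
--
--     Table-driven: for each (output key, target format) pair, scan the rows
--     with any() asking whether some valid row's format equals the target.
--     """
--     return {
--         out_key: any(
--             isinstance(row, dict)
--             and row.get("format")
--             and str(row.get("format")) == target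
--             for row in format_prices
--         )
--         for out_key, target in _OFFER_TABLE
--     }
-- ===== Notes on version B (the rewrite author's own statement) =====
-- stated objective: alternative
-- what changed: Replaces building a set of enabled formats and then three membership lookups with a table-driven dict comprehension: for each (output key, target format) pair it runs any() over the rows asking whether a valid row's format equals that target, so no intermediate set or flag state exists.
import Mathlib
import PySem

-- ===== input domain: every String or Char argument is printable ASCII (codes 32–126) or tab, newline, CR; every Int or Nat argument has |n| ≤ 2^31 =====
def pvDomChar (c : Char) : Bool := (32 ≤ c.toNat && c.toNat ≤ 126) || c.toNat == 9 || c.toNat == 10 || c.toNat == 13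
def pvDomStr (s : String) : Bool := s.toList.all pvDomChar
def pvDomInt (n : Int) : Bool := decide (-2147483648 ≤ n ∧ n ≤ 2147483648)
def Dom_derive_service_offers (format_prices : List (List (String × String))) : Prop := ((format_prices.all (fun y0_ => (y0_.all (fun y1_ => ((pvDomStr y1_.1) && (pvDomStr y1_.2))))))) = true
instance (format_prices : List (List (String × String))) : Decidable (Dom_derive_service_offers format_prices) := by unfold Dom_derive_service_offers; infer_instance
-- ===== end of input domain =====

-- ===== PORT A =====
-- B replaces A's build-a-set-then-three-lookups with a table-driven any() scan per output key (objective: alternative).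
def derive_service_offers (format_prices : List (List (String × String))) : List (String × Bool) :=
  let enabled : PySem.Set String :=
    format_prices.foldl (fun s row =>
      match (PySem.Dict.mk row).get? "format" with
      | none => s
      | some v => if v = "" then s else PySem.Set.add s v) PySem.Set.empty
  [("offers_travel", PySem.Set.contains enabled "student_location"),
   ("offers_at_location", PySem.Set.contains enabled "instructor_location"),
   ("offers_online", PySem.Set.contains enabled "online")]

-- ===== PORT B =====
def pvOfferTable : List (String × String) :=
  [("offers_travel", "student_location"),
   ("offers_at_location", "instructor_location"),
   ("offers_online", "online")]

def derive_service_offers_alt (format_prices : List (List (String × String))) : List (String × Bool) :=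
  pvOfferTable.map (fun kt =>
    (kt.1, format_prices.any (fun row =>
      match (PySem.Dict.mk row).get? "format" with
      | none => false
      | some v => v ≠ "" && v = kt.2)))

-- ===== PRECONDITION & SPEC =====
def Spec_derive_service_offers (format_prices : List (List (String × String))) (out : List (String × Bool)) : Prop := out = derive_service_offers_alt format_prices
instance (format_prices : List (List (String × String))) (out : List (String × Bool)) : Decidable (Spec_derive_service_offers format_prices out) := by unfold Spec_derive_service_offers; infer_instance

-- ===== CLAIM (what is proved, stated in full; the proofs are below) =====
def Claim_equal_derive_service_offers : Prop := ∀ (format_prices : List (List (String × String))), Dom_derive_service_offers format_prices → Spec_derive_service_offers format_prices (derive_service_offers format_prices)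

-- ===== LEMMAS AND PROOFS =====

lemma contains_loop (t : String) (fps : List (List (String × String))) : ∀ (s : PySem.Set String),
    PySem.Set.contains
      (fps.foldl (fun s row =>
        match (PySem.Dict.mk row).get? "format" with
        | none => s
        | some v => if v = "" then s else PySem.Set.add s v) s) t
    = (PySem.Set.contains s t ||
        fps.any (fun row =>
          match (PySem.Dict.mk row).get? "format" with
          | none => false
          | some v => v ≠ "" && v = t)) := by
  induction fps with
  | nil => intro s; simp
  | cons row rest ih =>
    intro s
    simp only [List.foldl_cons, List.any_cons]
    cases h : (PySem.Dict.mk row).get? "format" with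
    | none =>
      rw [ih s]; simp
    | some v =>
      by_cases he : v = ""
      · simp only [if_pos he]
        rw [ih s]; simp [he]
      · simp only [if_neg he]
        rw [ih (PySem.Set.add s v)]
        have hadd : PySem.Set.contains (PySem.Set.add s v) t
            = (PySem.Set.contains s t || decide (v = t)) := by
          by_cases hv : v = t
          · subst hv
            simp [PySem.Set.contains, PySem.Set.add]
            split_ifs with hc <;> simp_all [PySem.Set.contains]
          · simp only [PySem.Set.contains, PySem.Set.add]
            split_ifs with hc
            · simp [hv]
            · simp [hv]
              exact fun e => absurd e.symm hv
        rw [hadd]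
        simp [he, Bool.or_assoc]

-- ===== VERDICT (by name: the statement is the Claim_ definition above) =====
theorem derive_service_offers_spec : Claim_equal_derive_service_offers := by
  intro fps _
  unfold Spec_derive_service_offers derive_service_offers derive_service_offers_alt pvOfferTable
  simp only [List.map_cons, List.map_nil]
  rw [contains_loop "student_location" fps PySem.Set.empty,
      contains_loop "instructor_location" fps PySem.Set.empty,
      contains_loop "online" fps PySem.Set.empty]
  rfl
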